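-- pv_equiv track=rewrite | github.com/spriteboysz/LeetcodePython | algorithm/P2490. 回环句.py | isCircularSentence
-- ===== SOURCE A (Python) =====
-- def isCircularSentence(sentence: str) -> bool:
--     words = sentence.split()
--     flag = True
--     for i in range(len(words)):
--         if i == 0:
--             if words[-1][-1] != words[0][0]:
--                 flag = False
--                 break
--         else:
--             if words[i - 1][-1] != words[i][0]:
--                 flag = False
--                 break
--     return flag
-- ===== SOURCE B (Python) =====
-- def isCircularSentence(sentence: str) -> bool:
--     # One pass over the characters: no word list is built.
--     first = None      # first char of the first word
--     last = None       # last non-whitespace char seen so far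
--     ok = True         # all adjacent end/start checks so far
--     in_word = False
--     for c in sentence:
--         if c.isspace():
--             in_word = False
--         else:
--             if not in_word:          # c starts a new word
--                 if first is None:
--                     first = c
--                 elif last != c:
--                     ok = False
--             in_word = True
--             last = c
--     if first is None:
--         return True
--     return ok and last == first
-- ===== Notes on version B (the rewrite author's own statement) =====
-- stated objective: alternative
-- what changed: B replaces split()-then-index-loop (which materialises the whole word list and indexes into it) by a single character-by-character scan that tracks only the first word's first char, the last non-space char seen and a running check flag.
import Mathlib
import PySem

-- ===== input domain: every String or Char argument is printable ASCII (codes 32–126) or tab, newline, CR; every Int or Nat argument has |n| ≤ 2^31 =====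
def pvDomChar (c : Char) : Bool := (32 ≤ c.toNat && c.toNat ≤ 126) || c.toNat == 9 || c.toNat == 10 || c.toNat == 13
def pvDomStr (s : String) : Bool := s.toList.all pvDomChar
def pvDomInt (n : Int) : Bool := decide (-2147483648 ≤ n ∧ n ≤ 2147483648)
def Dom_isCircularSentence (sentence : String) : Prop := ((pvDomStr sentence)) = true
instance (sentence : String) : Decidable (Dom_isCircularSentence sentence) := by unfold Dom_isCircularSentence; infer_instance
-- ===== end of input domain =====

-- B replaces split()-plus-index-loop by a single character scan that never builds the word list (objective: alternative).

-- ===== PORT A =====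
-- the 'for i in range(len(words))' loop with its break: returns false at the first failed comparison
def aLoop (words : List String) : List Int → Bool
  | [] => true
  | i :: rest =>
    if i == 0 then
      if PySem.Str.pyGet? (PySem.List.pyGetD words (-1) "") (-1)
          ≠ PySem.Str.pyGet? (PySem.List.pyGetD words 0 "") 0 then false
      else aLoop words rest
    else
      if PySem.Str.pyGet? (PySem.List.pyGetD words (i - 1) "") (-1)
          ≠ PySem.Str.pyGet? (PySem.List.pyGetD words i "") 0 then false
      else aLoop words rest

def isCircularSentence (sentence : String) : Bool :=
  let words := PySem.Str.split₀ sentence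
  aLoop words (PySem.List.pyRange 0 (words.length : Int) 1)

-- ===== PORT B =====
-- loop state: the four local variables first / last / ok / in_word of Source B
structure BSt where
  first : Option Char
  last : Option Char
  ok : Bool
  inWord : Bool
deriving DecidableEq, Repr

def bStep (s : BSt) (c : Char) : BSt :=
  if PySem.Chars.isspace c then { s with inWord := false }
  else
    let s1 :=
      if !s.inWord then
        if s.first = none then { s with first := some c }
        else if s.last ≠ some c then { s with ok := false }
        else s
      else s
    { s1 with inWord := true, last := some c }

def isCircularSentence_alt (sentence : String) : Bool :=
  let s := sentence.toList.foldl bStep ⟨none, none, true, false⟩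
  match s.first with
  | none => true
  | some f => s.ok && (s.last == some f)

-- ===== PRECONDITION & SPEC =====
def Spec_isCircularSentence (sentence : String) (out : Bool) : Prop := out = isCircularSentence_alt sentence
instance (sentence : String) (out : Bool) : Decidable (Spec_isCircularSentence sentence out) := by unfold Spec_isCircularSentence; infer_instance

-- ===== CLAIM (what is proved, stated in full; the proofs are below) =====
def Claim_equal_isCircularSentence : Prop := ∀ (sentence : String), Dom_isCircularSentence sentence → Spec_isCircularSentence sentence (isCircularSentence sentence)

-- ===== LEMMAS AND PROOFS =====

-- common reference value: the adjacent end/start checks over a word list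
def chainB : List (List Char) → Bool
  | [] => true
  | [_] => true
  | u :: v :: ws => (u.getLast? == v.head?) && chainB (v :: ws)

-- what A computes on a word list: the wrap-around check plus the chain
def aSpec (ws : List (List Char)) : Bool :=
  match ws with
  | [] => true
  | w :: _ => ((ws.getLast?.getD []).getLast? == w.head?) && chainB ws

-- B's final read-out of the loop state
def finB (s : BSt) : Bool :=
  match s.first with
  | none => true
  | some f => s.ok && (s.last == some f)

-- the word list represented by split₀.go's intermediate state (cur, acc)
def wsf (cur : List Char) (acc : List (List Char)) : List (List Char) :=
  acc.reverse ++ (if cur.isEmpty then [] else [cur.reverse])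

theorem pyGet?_zero {α : Type} (xs : List α) : PySem.List.pyGet? xs 0 = xs.head? := by
  cases xs <;> simp [PySem.List.pyGet?, PySem.List.pyIdx?]

theorem chainB_len_le_one (l : List (List Char)) (h : l.length ≤ 1) : chainB l = true := by
  match l with
  | [] => rfl
  | [_] => rfl
  | _ :: _ :: _ => simp at h

theorem chainB_snoc (ws : List (List Char)) (w : List Char) :
    chainB (ws ++ [w]) =
      (chainB ws && match ws.getLast? with | none => true | some u => u.getLast? == w.head?) := by
  induction ws with
  | nil => simp [chainB]
  | cons u t ih =>
    cases t with
    | nil => simp [chainB]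
    | cons v t' =>
      show (_ && chainB ((v :: t') ++ [w])) = _
      rw [ih]
      simp only [chainB, List.getLast?_cons_cons, Bool.and_assoc]
theorem wsf_head (cur : List Char) (acc : List (List Char)) :
    (wsf cur acc).head?.bind List.head? =
      (match acc.reverse with | [] => cur.getLast? | w :: _ => w.head?) := by
  cases h : acc.reverse with
  | nil => cases cur <;> simp [wsf, h, ← List.head?_reverse]
  | cons w t => cases cur <;> simp [wsf, h]
theorem wsf_last (cur : List Char) (acc : List (List Char)) :
    (wsf cur acc).getLast?.bind List.getLast? =
      (if cur.isEmpty then (match acc with | [] => none | w :: _ => w.getLast?) else cur.head?) := by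
  cases cur with
  | nil => cases acc <;> simp [wsf, List.getLast?_reverse]
  | cons c cur' => simp [wsf, List.getLast?_reverse]
theorem wsf_mem_ne_nil (cur : List Char) (acc : List (List Char))
    (h5 : ∀ w ∈ acc, w ≠ []) : ∀ w ∈ wsf cur acc, w ≠ [] := by
  intro w hw
  simp only [wsf, List.mem_append, List.mem_reverse] at hw
  rcases hw with h | h
  · exact h5 w h
  · rcases cur with _ | ⟨c, cur'⟩
    · simp at h
    · simp at h; subst h; simp

theorem bMain (cs : List Char) : ∀ (cur : List Char) (acc : List (List Char)) (s : BSt),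
    s.inWord = !cur.isEmpty →
    s.first = (wsf cur acc).head?.bind List.head? →
    s.last = (wsf cur acc).getLast?.bind List.getLast? →
    s.ok = chainB (wsf cur acc) →
    (∀ w ∈ acc, w ≠ []) →
    finB (List.foldl bStep s cs) = aSpec (PySem.Chars.split₀.go cs cur acc) := by
  induction cs with
  | nil =>
    intro cur acc s h1 h2 h3 h4 h5
    have hgo : PySem.Chars.split₀.go [] cur acc = wsf cur acc := by
      cases cur <;> simp [PySem.Chars.split₀.go, wsf]
    rw [List.foldl_nil, hgo]
    cases hwsf : wsf cur acc with
    | nil =>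
      rw [hwsf] at h2; simp at h2
      simp [finB, h2, aSpec]
    | cons w ws =>
      have hw : w ≠ [] := wsf_mem_ne_nil cur acc h5 w (by rw [hwsf]; exact List.mem_cons_self)
      rcases w with _ | ⟨f, wt⟩
      · exact absurd rfl hw
      rw [hwsf] at h2 h3 h4
      simp only [List.head?_cons, Option.bind_some] at h2
      have hne : (f :: wt) :: ws ≠ [] := by simp
      rw [List.getLast?_eq_some_getLast hne] at h3
      simp only [Option.bind_some] at h3
      simp only [finB, h2, aSpec, List.getLast?_eq_some_getLast hne, Option.getD_some, h3, h4,
        List.head?_cons, Bool.and_comm]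
  | cons c rest ih =>
    intro cur acc s h1 h2 h3 h4 h5
    rw [List.foldl_cons]
    by_cases hsp : PySem.Chars.isspace c = true
    · rw [show bStep s c = { s with inWord := false } from by simp [bStep, hsp]]
      have hgo : PySem.Chars.split₀.go (c :: rest) cur acc =
          (if cur.isEmpty then PySem.Chars.split₀.go rest [] acc
           else PySem.Chars.split₀.go rest [] (cur.reverse :: acc)) := by
        simp [PySem.Chars.split₀.go, hsp]
      rw [hgo]
      rcases cur with _ | ⟨a, t⟩
      · simp only [List.isEmpty_nil, if_pos]
        exact ih [] acc _ (by simp) (by simpa using h2) (by simpa using h3) (by simpa using h4) h5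
      · simp only [List.isEmpty_cons, Bool.false_eq_true, if_neg, not_false_iff]
        have hW : wsf [] ((a :: t).reverse :: acc) = wsf (a :: t) acc := by simp [wsf]
        exact ih [] ((a :: t).reverse :: acc) _ (by simp)
          (by rw [hW]; simpa using h2) (by rw [hW]; simpa using h3)
          (by rw [hW]; simpa using h4)
          (by intro w hw; rcases List.mem_cons.mp hw with rfl | hw
              · simp
              · exact h5 w hw)
    · have hgo : PySem.Chars.split₀.go (c :: rest) cur acc =
          PySem.Chars.split₀.go rest (c :: cur) acc := by
        simp [PySem.Chars.split₀.go, hsp]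
      rw [hgo]
      cases hiw : s.inWord with
      | true =>
        have hc : ∃ a t, cur = a :: t := by
          rw [hiw] at h1
          cases cur with
          | nil => simp at h1
          | cons a t => exact ⟨a, t, rfl⟩
        obtain ⟨a, t, rfl⟩ := hc
        rw [show bStep s c = { s with inWord := true, last := some c } from by
          simp [bStep, hsp, hiw]]
        apply ih (c :: a :: t) acc _ (by simp) ?_ ?_ ?_ h5
        · show s.first = _
          rw [h2, wsf_head, wsf_head, List.getLast?_cons_cons]
        · show (some c : Option Char) = _
          rw [wsf_last]; simp
        · show s.ok = _
          rw [h4]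
          simp only [wsf, List.isEmpty_cons, Bool.false_eq_true, if_neg, not_false_iff,
            List.reverse_cons]
          rw [chainB_snoc, chainB_snoc]
          have hh : (t.reverse ++ [a] ++ [c]).head? = (t.reverse ++ [a]).head? := by
            cases ht : t.reverse with
            | nil => simp
            | cons x xs => simp
          rw [hh]
      | false =>
        have hc : cur = [] := by
          rw [hiw] at h1
          cases cur with
          | nil => rfl
          | cons a t => simp at h1
        subst hc
        have hwa : wsf [] acc = acc.reverse := by simp [wsf]
        rw [hwa] at h2 h3 h4
        have hwc : wsf [c] acc = acc.reverse ++ [[c]] := by simp [wsf]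
        cases hf : s.first with
        | none =>
          have hacc : acc = [] := by
            cases hr : acc.reverse with
            | nil => simpa using congrArg List.reverse hr
            | cons w t =>
              rw [hf, hr] at h2
              have hw : w ≠ [] := h5 w (by rw [← List.mem_reverse, hr]; exact List.mem_cons_self)
              rcases w with _ | ⟨x, xs⟩
              · exact absurd rfl hw
              · simp at h2
          subst hacc
          rw [show bStep s c = { s with first := some c, inWord := true, last := some c } from by
            simp [bStep, hsp, hiw, hf]]
          apply ih [c] [] _ (by simp) ?_ ?_ ?_ (by simp)
          · show (some c : Option Char) = _
            rw [wsf_head]; simp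
          · show (some c : Option Char) = _
            rw [wsf_last]; simp
          · show s.ok = _
            rw [h4]; simp [wsf, chainB]
        | some f =>
          have hr' : acc.reverse ≠ [] := by
            intro h; rw [hf, h] at h2; simp at h2
          by_cases hl : s.last = some c
          · rw [show bStep s c = { s with inWord := true, last := some c } from by
              simp [bStep, hsp, hiw, hf, hl]]
            apply ih [c] acc _ (by simp) ?_ ?_ ?_ h5
            · show s.first = _
              rw [h2, wsf_head]
              cases hr : acc.reverse with
              | nil => exact absurd hr hr'
              | cons w t => simp
            · show (some c : Option Char) = _
              rw [wsf_last]; simp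
            · show s.ok = _
              rw [h4, hwc, chainB_snoc]
              cases hg : acc.reverse.getLast? with
              | none => simp
              | some u =>
                rw [hg] at h3
                simp only [Option.bind_some] at h3
                rw [hl] at h3
                simp [← h3]
          · rw [show bStep s c = { s with ok := false, inWord := true, last := some c } from by
              simp [bStep, hsp, hiw, hf, hl]]
            apply ih [c] acc _ (by simp) ?_ ?_ ?_ h5
            · show s.first = _
              rw [h2, wsf_head]
              cases hr : acc.reverse with
              | nil => exact absurd hr hr'
              | cons w t => simp
            · show (some c : Option Char) = _
              rw [wsf_last]; simp
            · show (false : Bool) = _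
              rw [hwc, chainB_snoc]
              cases hg : acc.reverse.getLast? with
              | none =>
                rw [List.getLast?_eq_none_iff] at hg
                exact absurd hg hr'
              | some u =>
                rw [hg] at h3
                simp only [Option.bind_some] at h3
                have hne : ¬(u.getLast? == some c) = true := by
                  rw [← h3]; simpa using hl
                simp [hne]

theorem aLoop_tail (words : List String) : ∀ (m k : Nat), 1 ≤ k → words.length - k = m →
    aLoop words (PySem.List.pyRange (k : Int) (words.length : Int) 1) =
      chainB ((words.map String.toList).drop (k - 1)) := by
  intro m
  induction m with
  | zero =>
    intro k hk hm
    have hle : words.length ≤ k := by omega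
    rw [PySem.List.pyRange_one_eq_nil (by exact_mod_cast hle)]
    rw [aLoop]
    exact (chainB_len_le_one _ (by simp; omega)).symm
  | succ n ihn =>
    intro k hk hm
    have hlt : k < words.length := by omega
    rw [PySem.List.pyRange_one_cons (by exact_mod_cast hlt)]
    rw [aLoop]
    have hk0 : ((k : Int) == 0) = false := by simp; omega
    rw [hk0]
    simp only [Bool.false_eq_true, if_neg, not_false_iff]
    -- words[k-1], words[k]
    have e1 : PySem.List.pyGetD words ((k : Int) - 1) "" = words[k - 1]'(by omega) := by
      rw [show (k : Int) - 1 = ((k - 1 : Nat) : Int) from by omega]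
      rw [PySem.List.pyGetD_natCast]
      simp [List.getD, List.getElem?_eq_getElem (by omega : k - 1 < words.length)]
    have e2 : PySem.List.pyGetD words (k : Int) "" = words[k]'hlt := by
      rw [PySem.List.pyGetD_natCast]
      simp [List.getD, List.getElem?_eq_getElem hlt]
    rw [e1, e2]
    have hrec : aLoop words (PySem.List.pyRange ((k : Int) + 1) (words.length : Int) 1) =
        chainB ((words.map String.toList).drop k) := by
      have := ihn (k + 1) (by omega) (by omega)
      rw [show ((k + 1 : Nat) : Int) = (k : Int) + 1 from by push_cast; ring] at this
      simpa using this
    set cw := words.map String.toList with hcw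
    have hlcw : cw.length = words.length := by simp [hcw]
    have d1 : cw.drop (k - 1) = cw[k - 1]'(by simp [hcw]; omega) :: cw.drop k := by
      rw [List.drop_eq_getElem_cons (by simp [hcw]; omega)]
      congr 1
      simp [hcw]
      omega
    have d2 : cw.drop k = cw[k]'(by simp [hcw]; omega) :: cw.drop (k + 1) := List.drop_eq_getElem_cons (by simp [hcw]; omega)
    rw [d1, d2, chainB]
    rw [← d2, ← hrec]
    have g1 : cw[k - 1]'(by simp [hcw]; omega) = (words[k - 1]'(by omega)).toList := by simp [hcw]
    have g2 : cw[k]'(by simp [hcw]; omega) = (words[k]'hlt).toList := by simp [hcw]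
    rw [g1, g2]
    have p1 : PySem.Str.pyGet? (words[k - 1]'(by omega)) (-1) = (words[k - 1]'(by omega)).toList.getLast? := by
      simp [PySem.List.pyGet?_neg_one]
    have p2 : PySem.Str.pyGet? (words[k]'hlt) 0 = (words[k]'hlt).toList.head? := by
      simp [pyGet?_zero]
    rw [p1, p2]
    by_cases h : (words[k - 1]'(by omega)).toList.getLast? = (words[k]'hlt).toList.head?
    · simp [h]
    · simp [h]


theorem aSide (sentence : String) :
    isCircularSentence sentence = aSpec (PySem.Chars.split₀ sentence.toList) := by
  have h0 : isCircularSentence sentence =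
      aLoop (PySem.Str.split₀ sentence)
        (PySem.List.pyRange 0 (((PySem.Str.split₀ sentence).length : Nat) : Int) 1) := rfl
  rw [h0, ← PySem.Str.split₀_map_toList]
  set words := PySem.Str.split₀ sentence with hw
  clear_value words
  cases hws : words with
  | nil =>
    subst hws
    rw [show ((([] : List String).length : Nat) : Int) = 0 from rfl,
      PySem.List.pyRange_one_eq_nil le_rfl]
    rfl
  | cons w ws =>
    subst hws
    rw [PySem.List.pyRange_one_cons (by exact_mod_cast (by simp : 0 < (w :: ws).length))]
    rw [aLoop]
    simp only [BEq.rfl, if_pos]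
    have e0 : PySem.List.pyGetD (w :: ws) 0 "" = w := by
      rw [show (0 : Int) = ((0 : Nat) : Int) from rfl, PySem.List.pyGetD_natCast]
      simp
    have elast : PySem.List.pyGetD (w :: ws) (-1) "" = (w :: ws).getLast (by simp) := by
      simp [PySem.List.pyGetD, PySem.List.pyGet?_neg_one,
        List.getLast?_eq_some_getLast (l := w :: ws) (by simp)]
    have hwrap : PySem.Str.pyGet? (PySem.List.pyGetD (w :: ws) (-1) "") (-1) =
        (((w :: ws).map String.toList).getLast?.getD []).getLast? := by
      rw [elast]
      rw [show ((w :: ws).map String.toList).getLast? = some (((w :: ws).getLast (by simp)).toList) from ?_]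
      · simp [PySem.List.pyGet?_neg_one]
      · rw [List.getLast?_map, List.getLast?_eq_some_getLast (l := w :: ws) (by simp)]
        simp
    have hhead : PySem.Str.pyGet? (PySem.List.pyGetD (w :: ws) 0 "") 0 = w.toList.head? := by
      rw [e0]; simp [pyGet?_zero]
    rw [hwrap, hhead]
    have hrec : aLoop (w :: ws) (PySem.List.pyRange (0 + 1) ((w :: ws).length : Int) 1) =
        chainB (((w :: ws).map String.toList).drop 0) := by
      have := aLoop_tail (w :: ws) ((w :: ws).length - 1) 1 (by omega) rfl
      simpa using this
    rw [hrec]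
    have haspec : aSpec ((w :: ws).map String.toList) =
        (((((w :: ws).map String.toList).getLast?.getD []).getLast? == w.toList.head?) &&
          chainB ((w :: ws).map String.toList)) := rfl
    rw [List.drop_zero, haspec]
    simp only [List.map_cons]
    by_cases h : ((w.toList :: ws.map String.toList).getLast?.getD []).getLast? = w.toList.head?
    · rw [h]
      simp
    · simp [h]

theorem bSide (sentence : String) :
    isCircularSentence_alt sentence = aSpec (PySem.Chars.split₀ sentence.toList) := by
  have h0 : isCircularSentence_alt sentence =
      finB (sentence.toList.foldl bStep ⟨none, none, true, false⟩) := rfl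
  rw [h0, bMain sentence.toList [] [] ⟨none, none, true, false⟩ (by simp) (by simp [wsf])
    (by simp [wsf]) (by simp [wsf, chainB]) (by simp)]
  rfl

-- ===== VERDICT (by name: the statement is the Claim_ definition above) =====
theorem isCircularSentence_spec : Claim_equal_isCircularSentence := by
  intro sentence _
  unfold Spec_isCircularSentence
  rw [aSide, bSide]
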